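-- pv_equiv track=rewrite | github.com/PCantarutti/CS50 | CS50x - 2024/simplemode.py | SimpleMode
-- ===== SOURCE A (Python) =====
-- def SimpleMode(arr):
--   Aset = set(arr)
--   modeC = 1
--   modeN = arr[0]  # Inicializar o modo com o primeiro elemento da lista
--   modeIndex = 0
--
--   for i in Aset:
--     count = arr.count(i)
--     index = arr.index(i)
--
--     if count > modeC:
--       modeC = count
--       modeN = i
--       modeIndex = index
--     elif count == modeC and index < modeIndex:
--       # Se a frequência é a mesma e o índice é menor, atualiza o modo
--       modeN = i
--       modeIndex = index
--
--   return modeN if modeC != 1 else -1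
-- ===== SOURCE B (Python) =====
-- def SimpleMode(arr):
--     counts = {}
--     for x in arr:
--         counts[x] = counts.get(x, 0) + 1
--     value, count = max(counts.items(), key=lambda kv: kv[1])
--     return value if count != 1 else -1
-- ===== Notes on version B (the rewrite author's own statement) =====
-- stated objective: faster
-- what changed: B builds a frequency dict in one pass and selects the first-maximal (key,count) pair with max over the items, replacing A's loop over set(arr) that rescans the whole list with .count and .index for every distinct element.
import Mathlib
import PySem

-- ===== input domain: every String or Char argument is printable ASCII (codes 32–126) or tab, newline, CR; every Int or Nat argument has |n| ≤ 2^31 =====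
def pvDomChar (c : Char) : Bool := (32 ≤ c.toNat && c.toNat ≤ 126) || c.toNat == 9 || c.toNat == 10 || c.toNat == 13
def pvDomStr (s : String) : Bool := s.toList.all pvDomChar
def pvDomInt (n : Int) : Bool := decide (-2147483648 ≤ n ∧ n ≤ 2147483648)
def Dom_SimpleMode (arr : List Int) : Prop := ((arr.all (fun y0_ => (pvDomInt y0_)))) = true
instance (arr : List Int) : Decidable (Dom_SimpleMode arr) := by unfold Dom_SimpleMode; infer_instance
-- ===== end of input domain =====

-- B replaces A's per-distinct-element .count/.index rescans by one counting pass over a dict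
-- and a single max over its items (objective: faster).

-- ===== PORT A =====
-- loop body of A's 'for i in Aset' (count and index recomputed from arr each iteration, as in A)
def stepA_SimpleMode (arr : List Int) (st : Int × Int × Int) (i : Int) : Int × Int × Int :=
  if ((PySem.List.count arr i : Int)) > st.1 then
    ((PySem.List.count arr i : Int), i, (((PySem.List.index? arr i).getD 0 : Nat) : Int))
  else if (PySem.List.count arr i : Int) = st.1 ∧ (((PySem.List.index? arr i).getD 0 : Nat) : Int) < st.2.2 then
    (st.1, i, (((PySem.List.index? arr i).getD 0 : Nat) : Int))
  else st

def SimpleMode (arr : List Int) : Int :=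
  -- arr[0]: IndexError on the empty list, excluded by Pre_ (the getD 0 default is dead code there)
  let st := (PySem.Set.ofList arr).foldl (stepA_SimpleMode arr) (1, (PySem.List.pyGet? arr 0).getD 0, 0)
  if st.1 ≠ 1 then st.2.1 else -1

-- ===== PORT B =====
def SimpleMode_alt (arr : List Int) : Int :=
  -- counts = {}; for x in arr: counts[x] = counts.get(x, 0) + 1
  -- max(counts.items(), key=lambda kv: kv[1]): ValueError on the empty list, excluded by Pre_
  match PySem.List.max?
      (arr.foldl (fun (d : PySem.Dict Int Int) x => d.insert x (d.getD x 0 + 1)) PySem.Dict.empty).items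
      (fun kv => kv.2) with
  | some kv => if kv.2 ≠ 1 then kv.1 else -1
  | none => -1

-- ===== PRECONDITION & SPEC =====
-- Pre_ excludes exactly the empty list, on which A raises IndexError (arr[0]) and B raises ValueError (max of empty sequence).
def Pre_SimpleMode (arr : List Int) : Prop := arr ≠ []
instance (arr : List Int) : Decidable (Pre_SimpleMode arr) := by unfold Pre_SimpleMode; infer_instance
def pvWitness_SimpleMode : List Int := [3, 1, 3, 2]

def Spec_SimpleMode (arr : List Int) (out : Int) : Prop := out = SimpleMode_alt arr
instance (arr : List Int) (out : Int) : Decidable (Spec_SimpleMode arr out) := by unfold Spec_SimpleMode; infer_instance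

-- ===== CLAIM (what is proved, stated in full; the proofs are below) =====
def Claim_equal_SimpleMode : Prop := ∀ (arr : List Int), Dom_SimpleMode arr → Pre_SimpleMode arr → Spec_SimpleMode arr (SimpleMode arr)

-- ===== LEMMAS AND PROOFS =====

-- first-occurrence index of i in arr, as A's 'arr.index(i)' computes it for i ∈ arr
def idxN_SimpleMode (arr : List Int) (i : Int) : Nat := (PySem.List.index? arr i).getD 0

-- B's selection step, after List.foldl_map peels the (k, count) pairing off the fold
def stepB_SimpleMode (arr : List Int) (p : Int × Int) (i : Int) : Int × Int :=
  if p.2 < (PySem.List.count arr i : Int) then (i, (PySem.List.count arr i : Int)) else p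

lemma idxN_cons_self (a : Int) (t : List Int) : idxN_SimpleMode (a :: t) a = 0 := by
  rw [idxN_SimpleMode, PySem.List.index?_cons_self]; rfl

lemma idxN_cons_of_ne {a i : Int} (t : List Int) (h : a ≠ i) (hm : i ∈ t) :
    idxN_SimpleMode (a :: t) i = idxN_SimpleMode t i + 1 := by
  have h' := (PySem.List.index?_isSome_iff t i).2 hm
  rcases Option.isSome_iff_exists.1 h' with ⟨k, hk⟩
  rw [idxN_SimpleMode, idxN_SimpleMode, PySem.List.index?_cons_of_ne t h, hk]; rfl

-- the distinct elements of arr, in set(arr) order, have strictly increasing first indices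
lemma ofList_pairwise_idx (arr : List Int) :
    (PySem.Set.ofList arr).Pairwise (fun x y => idxN_SimpleMode arr x < idxN_SimpleMode arr y) := by
  induction arr with
  | nil => simp [PySem.Set.ofList_nil]
  | cons a t ih =>
    rw [PySem.Set.ofList_cons]
    constructor
    · intro y hy
      rcases (PySem.Set.mem_discard _ a y).1 hy with ⟨hyt, hne⟩
      have hmem : y ∈ t := (PySem.Set.mem_ofList t y).1 hyt
      rw [idxN_cons_self, idxN_cons_of_ne t (Ne.symm hne) hmem]
      omega
    · have hsub : ((PySem.Set.ofList t).discard a).Sublist (PySem.Set.ofList t) := by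
        rw [PySem.Set.discard]
        exact List.filter_sublist (l := PySem.Set.ofList t)
      have hpw := List.Pairwise.sublist hsub ih
      refine hpw.imp_of_mem ?_
      intro x y hx hy hlt
      rcases (PySem.Set.mem_discard _ a x).1 hx with ⟨hxt, hxa⟩
      rcases (PySem.Set.mem_discard _ a y).1 hy with ⟨hyt, hya⟩
      rw [idxN_cons_of_ne t (Ne.symm hxa) ((PySem.Set.mem_ofList t x).1 hxt),
          idxN_cons_of_ne t (Ne.symm hya) ((PySem.Set.mem_ofList t y).1 hyt)]
      omega

-- A's fold and B's first-max fold agree given strictly increasing indices ahead of the cursor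
lemma loop_eq (arr : List Int) : ∀ (ys : List Int) (c n idx : Int),
    ys.Pairwise (fun x y => idxN_SimpleMode arr x < idxN_SimpleMode arr y) →
    (∀ i ∈ ys, idx < (idxN_SimpleMode arr i : Int)) →
    (ys.foldl (stepA_SimpleMode arr) (c, n, idx)).1 = (ys.foldl (stepB_SimpleMode arr) (n, c)).2 ∧
    (ys.foldl (stepA_SimpleMode arr) (c, n, idx)).2.1 = (ys.foldl (stepB_SimpleMode arr) (n, c)).1 := by
  intro ys
  induction ys with
  | nil => intro c n idx _ _; simp
  | cons i tl ih =>
    intro c n idx hpw hidx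
    rcases List.pairwise_cons.1 hpw with ⟨hhead, htl⟩
    have hi : idx < (idxN_SimpleMode arr i : Int) := hidx i (List.mem_cons_self)
    by_cases hc : c < (PySem.List.count arr i : Int)
    · have hA : stepA_SimpleMode arr (c, n, idx) i =
          ((PySem.List.count arr i : Int), i, ((idxN_SimpleMode arr i : Nat) : Int)) := by
        rw [stepA_SimpleMode, if_pos (show (PySem.List.count arr i : Int) > c from hc)]
        rfl
      have hB : stepB_SimpleMode arr (n, c) i = (i, (PySem.List.count arr i : Int)) := by
        rw [stepB_SimpleMode, if_pos hc]
      rw [List.foldl_cons, List.foldl_cons, hA, hB]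
      exact ih _ _ _ htl (fun j hj => by exact_mod_cast Int.ofNat_lt.2 (hhead j hj))
    · have hA : stepA_SimpleMode arr (c, n, idx) i = (c, n, idx) := by
        rw [stepA_SimpleMode, if_neg (show ¬ ((PySem.List.count arr i : Int) > c) from hc), if_neg]
        intro hand
        have hand2 : (((PySem.List.index? arr i).getD 0 : Nat) : Int) < idx := hand.2
        simp only [idxN_SimpleMode] at hi
        omega
      have hB : stepB_SimpleMode arr (n, c) i = (n, c) := by
        rw [stepB_SimpleMode, if_neg hc]
      rw [List.foldl_cons, List.foldl_cons, hA, hB]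
      refine ih _ _ _ htl (fun j hj => ?_)
      have h1 := hhead j hj
      have h2 : (idxN_SimpleMode arr i : Int) < (idxN_SimpleMode arr j : Int) := by exact_mod_cast h1
      omega

-- max? over a nonempty list is the plain first-max fold from its head
lemma max2_cons : ∀ (l : List (Int × Int)) (p : Int × Int),
    PySem.List.max? (p :: l) (fun kv => kv.2) =
      some (l.foldl (fun (m x : Int × Int) => if m.2 < x.2 then x else m) p) := by
  intro l
  induction l with
  | nil => intro p; rfl
  | cons x tl ih =>
    intro p
    have h1 : PySem.List.max? (p :: x :: tl) (fun kv : Int × Int => kv.2)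
        = PySem.List.max? ((if p.2 < x.2 then x else p) :: tl) (fun kv => kv.2) := by
      by_cases h : p.2 < x.2 <;> simp [PySem.List.max?, List.foldl_cons, h]
    rw [h1, ih, List.foldl_cons]

theorem SimpleMode_spec_aux (arr : List Int) (hpre : arr ≠ []) :
    SimpleMode arr = SimpleMode_alt arr := by
  rcases arr with _ | ⟨a, t⟩
  · exact absurd rfl hpre
  set arr := a :: t with harr
  -- B side: the dict is Counter(arr); its items are (k, count k) over set(arr)
  have hcounts : (arr.foldl (fun (d : PySem.Dict Int Int) x => d.insert x (d.getD x 0 + 1))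
      PySem.Dict.empty).items = (PySem.Set.ofList arr).map (fun k => (k, (List.count k arr : Int))) := by
    rw [PySem.Dict.foldl_insert_getD_add_one_eq_counter, PySem.Dict.items_counter]
  -- set(arr) starts with a
  have hset : PySem.Set.ofList arr = a :: (PySem.Set.ofList t).discard a := PySem.Set.ofList_cons a t
  have hpw := ofList_pairwise_idx arr
  rw [hset] at hpw
  rcases List.pairwise_cons.1 hpw with ⟨hhead, htail⟩
  have hidxa : idxN_SimpleMode arr a = 0 := idxN_cons_self a t
  have hca : (1 : Int) ≤ (PySem.List.count arr a : Int) := by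
    have h1 : 1 ≤ List.count a arr := List.one_le_count_iff.2 (by simp [harr])
    exact_mod_cast h1
  -- the first loop iteration (i = a) turns A's initial state into (count a, a, 0)
  have hfirst : stepA_SimpleMode arr (1, a, 0) a = ((PySem.List.count arr a : Int), a, 0) := by
    by_cases h : (1 : Int) < (PySem.List.count arr a : Int)
    · rw [stepA_SimpleMode, if_pos (show (PySem.List.count arr a : Int) > (1 : Int) from h)]
      simp only [idxN_SimpleMode] at hidxa
      rw [hidxa]
      norm_num
    · have hone : (PySem.List.count arr a : Int) = 1 := le_antisymm (by omega) hca
      rw [stepA_SimpleMode, if_neg (show ¬ ((PySem.List.count arr a : Int) > (1 : Int)) from h), if_neg, hone]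
      intro hand
      have hand2 : (((PySem.List.index? arr a).getD 0 : Nat) : Int) < ((1 : Int), a, (0 : Int)).2.2 := hand.2
      simp only [idxN_SimpleMode] at hidxa
      rw [hidxa] at hand2
      norm_num at hand2
  have hmain := loop_eq arr ((PySem.Set.ofList t).discard a) (PySem.List.count arr a) a 0 htail
    (fun j hj => by
      have hj' := hhead j hj; rw [hidxa] at hj'; exact_mod_cast Int.ofNat_lt.2 hj')
  have hget : (PySem.List.pyGet? arr 0).getD 0 = a := by
    simp [harr, PySem.List.pyGet?, PySem.List.pyIdx?]
  show (if ((PySem.Set.ofList arr).foldl (stepA_SimpleMode arr)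
            (1, (PySem.List.pyGet? arr 0).getD 0, 0)).1 ≠ 1 then _ else -1) = _
  rw [hget, hset, List.foldl_cons, hfirst]
  rw [SimpleMode_alt, hcounts, hset]
  rw [List.map_cons, max2_cons, List.foldl_map]
  rcases hmain with ⟨h1, h2⟩
  rw [h1, h2]
  rfl

-- ===== VERDICT (by name: the statement is the Claim_ definition above) =====
theorem SimpleMode_spec : Claim_equal_SimpleMode := by
  intro arr _ hpre
  exact SimpleMode_spec_aux arr hpre
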